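-- pv_equiv track=rewrite | github.com/wuami/RiboLogic | analysis/compute_distance_matrix.py | bp_distance
-- ===== SOURCE A (Python) =====
-- def get_pairmap(secstruct):
--   """Get the pairing partners of each base in a secondary structure.
--
--   List of indices of pairing partners for each base, with -1 if unpaired.
--
--   Args:
--     secstruct: secondary structure in dot-bracket notation
--
--   Returns:
--     list of pairing partners
--   """
--   pairs = [-1] * len(secstruct)
--   bases = []
--   for i, base in enumerate(secstruct):
--     if base == '(':
--       bases.append(i)
--     elif base == ')':
--       j = bases.pop()
--       pairs[i] = j
--       pairs[j] = i
--   return pairs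
--
-- def bp_distance(secstruct1, secstruct2):
--   """Get base pair distance between two secondary structures.
--
--   This computes the number of base pairs that need to be broken or formed
--   to change one secondary structure to the other.
--
--   Args:
--     secstruct1: first secondary structure in dot bracket notation
--     secstruct2: second secondary structure in dot bracket notation
--
--   Returns:
--     int: base pair distance value
--   """
--   assert len(secstruct1) == len(secstruct2), (secstruct1, secstruct2)
--   pm1 = get_pairmap(secstruct1)
--   pm2 = get_pairmap(secstruct2)
--   dist = 0
--   for i in range(len(pm1)):
--     if pm1[i] != pm2[i] and (pm1[i] > i or pm2[i] > i):
--       dist += 1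
--   return dist
-- ===== SOURCE B (Python) =====
-- def _pairs(secstruct):
--   """Set of (open, close) index pairs, found by depth-bucketing.
--
--   Brackets at the same nesting depth alternate open/close left to right,
--   so the t-th '(' at depth d matches the t-th ')' at depth d; zip also
--   drops a trailing unmatched '(' at a depth automatically.
--   """
--   opens = {}
--   closes = {}
--   depth = 0
--   pairs = set()
--   for i, c in enumerate(secstruct):
--     if c == '(':
--       depth += 1
--       opens.setdefault(depth, []).append(i)
--     elif c == ')':
--       closes.setdefault(depth, []).append(i)
--       depth -= 1
--   for lvl, cl in closes.items():
--     pairs.update(zip(opens[lvl], cl))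
--   return pairs
--
-- def bp_distance(secstruct1, secstruct2):
--   assert len(secstruct1) == len(secstruct2), (secstruct1, secstruct2)
--   p1 = _pairs(secstruct1)
--   p2 = _pairs(secstruct2)
--   return len({i for i, j in p1} | {i for i, j in p2}) - len(p1 & p2)
-- ===== Notes on version B (the rewrite author's own statement) =====
-- stated objective: alternative
-- what changed: B matches brackets by nesting-depth bucketing (the t-th '(' at depth d pairs the t-th ')' at depth d, via per-depth lists and zip) instead of A's stack-pop pairmap, and computes the distance by set arithmetic len(left-endpoints union) - len(common pairs) instead of A's per-index comparison loop.
import Mathlib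
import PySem

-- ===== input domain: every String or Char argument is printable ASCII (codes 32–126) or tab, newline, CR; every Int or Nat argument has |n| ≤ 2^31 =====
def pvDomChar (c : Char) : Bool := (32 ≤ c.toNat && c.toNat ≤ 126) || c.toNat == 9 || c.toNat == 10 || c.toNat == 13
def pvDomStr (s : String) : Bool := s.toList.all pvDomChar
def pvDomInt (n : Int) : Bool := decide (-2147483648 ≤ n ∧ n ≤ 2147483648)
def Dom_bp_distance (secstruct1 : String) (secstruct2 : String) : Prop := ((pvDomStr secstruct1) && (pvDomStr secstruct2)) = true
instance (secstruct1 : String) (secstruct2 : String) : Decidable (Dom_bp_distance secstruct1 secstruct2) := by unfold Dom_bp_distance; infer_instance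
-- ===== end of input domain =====

-- B matches brackets by nesting-depth bucketing (the t-th '(' at depth d pairs the t-th ')'
-- at depth d) and computes the distance by set arithmetic |left endpoints of either| - |common pairs|,
-- instead of A's stack-pop symmetric pairmap compared index by index (alternative algorithm; same cost).

-- ===== PORT A =====
-- one step of get_pairmap's loop: state = (pairs, bases)
def pvStepA (st : List Int × List Int) (p : Int × Char) : List Int × List Int :=
  if p.2 = '(' then (st.1, st.2 ++ [p.1])
  else if p.2 = ')' then
    match st.2.getLast? with
    | none => st  -- Python: bases.pop() raises IndexError here; excluded by Pre_
    | some j => (PySem.List.pySetD (PySem.List.pySetD st.1 p.1 j) j p.1, st.2.dropLast)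
  else st

def get_pairmap (secstruct : List Char) : List Int :=
  ((PySem.List.enumerate secstruct 0).foldl pvStepA (List.replicate secstruct.length (-1), [])).1

def bp_distance (secstruct1 : String) (secstruct2 : String) : Int :=
  -- Python asserts len(secstruct1) == len(secstruct2); unequal lengths are excluded by Pre_
  let pm1 := get_pairmap secstruct1.toList
  let pm2 := get_pairmap secstruct2.toList
  (PySem.List.pyRange 0 (PySem.List.len pm1) 1).foldl
    (fun dist i =>
      if PySem.List.pyGetD pm1 i (-1) ≠ PySem.List.pyGetD pm2 i (-1) ∧
         (PySem.List.pyGetD pm1 i (-1) > i ∨ PySem.List.pyGetD pm2 i (-1) > i)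
      then dist + 1 else dist) 0

-- ===== PORT B =====
-- one step of _pairs's bucketing loop: state = (opens, closes, depth)
def pvStepBkt (st : PySem.Dict Int (List Int) × PySem.Dict Int (List Int) × Int)
    (p : Int × Char) : PySem.Dict Int (List Int) × PySem.Dict Int (List Int) × Int :=
  if p.2 = '(' then ((st.1).modify (st.2.2 + 1) [] (· ++ [p.1]), st.2.1, st.2.2 + 1)
  else if p.2 = ')' then (st.1, (st.2.1).modify st.2.2 [] (· ++ [p.1]), st.2.2 - 1)
  else st

def pvPairs (secstruct : List Char) : PySem.Set (Int × Int) :=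
  let st := (PySem.List.enumerate secstruct 0).foldl pvStepBkt
    (PySem.Dict.empty, PySem.Dict.empty, 0)
  -- Python: opens[lvl] raises KeyError when the level is absent; excluded by Pre_
  st.2.1.items.foldl
    (fun pairs q => PySem.Set.update pairs ((st.1.getD q.1 []).zip q.2)) PySem.Set.empty

def bp_distance_alt (secstruct1 : String) (secstruct2 : String) : Int :=
  -- Python asserts len(secstruct1) == len(secstruct2); unequal lengths are excluded by Pre_
  let p1 := pvPairs secstruct1.toList
  let p2 := pvPairs secstruct2.toList
  ((PySem.Set.len (PySem.Set.union (PySem.Set.ofList (p1.map Prod.fst)) (p2.map Prod.fst)) : Int)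
    - (PySem.Set.len (PySem.Set.inter p1 p2) : Int))

-- ===== PRECONDITION & SPEC =====
-- Pre_ excludes exactly the inputs where A raises: unequal lengths (AssertionError) and a close
-- bracket with no matching open bracket before it (IndexError from bases.pop()).
def pvPrefixBalanced (cs : List Char) : Prop :=
  ∀ n, n ≤ cs.length → (cs.take n).count ')' ≤ (cs.take n).count '('

def Pre_bp_distance (secstruct1 : String) (secstruct2 : String) : Prop :=
  secstruct1.toList.length = secstruct2.toList.length ∧
  pvPrefixBalanced secstruct1.toList ∧ pvPrefixBalanced secstruct2.toList

instance (secstruct1 : String) (secstruct2 : String) : Decidable (Pre_bp_distance secstruct1 secstruct2) := by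
  unfold Pre_bp_distance pvPrefixBalanced; infer_instance

def pvWitness_bp_distance : String × String := ("((.))", "(.)()")

def Spec_bp_distance (secstruct1 : String) (secstruct2 : String) (out : Int) : Prop := out = bp_distance_alt secstruct1 secstruct2
instance (secstruct1 : String) (secstruct2 : String) (out : Int) : Decidable (Spec_bp_distance secstruct1 secstruct2 out) := by unfold Spec_bp_distance; infer_instance

-- ===== CLAIM (what is proved, stated in full; the proofs are below) =====
def Claim_equal_bp_distance : Prop := ∀ (secstruct1 : String) (secstruct2 : String), Dom_bp_distance secstruct1 secstruct2 → Pre_bp_distance secstruct1 secstruct2 → Spec_bp_distance secstruct1 secstruct2 (bp_distance secstruct1 secstruct2)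

-- ===== LEMMAS AND PROOFS =====

-- proof-side reference: the stack scan collecting matched pairs as an Int→Int dict,
-- used as the bridge between A's pairmap and B's depth buckets
def pvStepD (st : List Int × PySem.Dict Int Int) (p : Int × Char) : List Int × PySem.Dict Int Int :=
  if p.2 = '(' then (st.1 ++ [p.1], st.2)
  else if p.2 = ')' then
    match st.1.getLast? with
    | none => st
    | some j => (st.1.dropLast, st.2.insert j p.1)
  else st

def pvRefDict (secstruct : List Char) : PySem.Dict Int Int :=
  ((PySem.List.enumerate secstruct 0).foldl pvStepD ([], PySem.Dict.empty)).2

-- the joint invariant of A's (pairs, stack) and the reference dict after scanning n characters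
def pvInv (L : Nat) (n : Int) (pairs st : List Int) (d : PySem.Dict Int Int) : Prop :=
  pairs.length = L ∧ 0 ≤ n ∧ d.keys.Nodup ∧ st.Nodup ∧
  (∀ x ∈ st, 0 ≤ x ∧ x < n ∧ d.contains x = false ∧ PySem.List.pyGetD pairs x (-1) = -1) ∧
  (∀ k, d.contains k = true → 0 ≤ k ∧ k < n) ∧
  (∀ k v, d.get? k = some v → 0 ≤ k ∧ PySem.List.pyGetD pairs k (-1) = v ∧ k < v ∧ v < n) ∧
  (∀ k : Int, 0 ≤ k → k < (L : Int) → d.contains k = false → PySem.List.pyGetD pairs k (-1) ≤ k) ∧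
  (∀ k : Int, n ≤ k → k < (L : Int) → PySem.List.pyGetD pairs k (-1) = -1)

theorem pvGetD_setD (xs : List Int) (i j v d : Int) (hi0 : 0 ≤ i)
    (hj0 : 0 ≤ j) (hjL : j < (xs.length : Int)) :
    PySem.List.pyGetD (PySem.List.pySetD xs i v) j d = if j = i then v else PySem.List.pyGetD xs j d := by
  rw [PySem.List.pySetD_of_nonneg xs v hi0,
      PySem.List.pyGetD_eq_getElem _ d hj0 (by simpa using hjL)]
  rw [List.getElem_set]
  split_ifs with h1 h2 h2
  · rfl
  · exact absurd (by omega : j = i) h2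
  · exact absurd (by omega : i.toNat = j.toNat) h1
  · rw [PySem.List.pyGetD_eq_getElem xs d hj0 (by omega)]

theorem pvScanMain (cs : List Char) (L : Nat) (n : Int) (pairs st : List Int) (d : PySem.Dict Int Int)
    (hinv : pvInv L n pairs st d) (hL : n + cs.length = L)
    (hbal : ∀ m ≤ cs.length, (cs.take m).count ')' ≤ (cs.take m).count '(' + st.length) :
    ((PySem.List.enumerate cs n).foldl pvStepD (st, d)).1
      = ((PySem.List.enumerate cs n).foldl pvStepA (pairs, st)).2 ∧
    pvInv L L ((PySem.List.enumerate cs n).foldl pvStepA (pairs, st)).1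
      ((PySem.List.enumerate cs n).foldl pvStepA (pairs, st)).2
      ((PySem.List.enumerate cs n).foldl pvStepD (st, d)).2 := by
  induction cs generalizing n pairs st d with
  | nil =>
    have hnL : n = (L : Int) := by simpa using hL
    exact ⟨rfl, hnL ▸ hinv⟩
  | cons c cs ih =>
    obtain ⟨h1, h2, h3, h4, h5, h6, h7, h8, h9⟩ := hinv
    have hL' : (n + 1) + (cs.length : Int) = L := by
      simp only [List.length_cons] at hL; push_cast at hL ⊢; omega
    have hnltL : n < (L : Int) := by omega
    have hmlen : ∀ m : Nat, m ≤ cs.length → m + 1 ≤ (c :: cs).length := by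
      intro m hm; simpa using Nat.succ_le_succ hm
    rw [PySem.List.enumerate_cons, List.foldl_cons, List.foldl_cons]
    by_cases hc1 : c = '('
    · subst hc1
      have hsA : pvStepA (pairs, st) (n, '(') = (pairs, st ++ [n]) := by simp [pvStepA]
      have hsB : pvStepD (st, d) (n, '(') = (st ++ [n], d) := by simp [pvStepD]
      rw [hsA, hsB]
      have hcontn : d.contains n = false := by
        cases hcc : d.contains n with
        | false => rfl
        | true => exact absurd (h6 n hcc).2 (by omega)
      refine ih (n + 1) pairs (st ++ [n]) d
        ⟨h1, by omega, h3, ?_, ?_, fun k hk => ⟨(h6 k hk).1, by have := (h6 k hk).2; omega⟩,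
         fun k v hkv => by obtain ⟨a, b, c', d'⟩ := h7 k v hkv; exact ⟨a, b, c', by omega⟩,
         h8, fun k hk hkL => h9 k (by omega) hkL⟩ hL' ?_
      · rw [List.nodup_append]
        exact ⟨h4, List.nodup_singleton _, fun x hx y hy hxy => by
          have := (h5 x hx).2.1; simp at hy; omega⟩
      · intro x hx
        rcases List.mem_append.mp hx with hmem | hmem
        · obtain ⟨a, b, c', d'⟩ := h5 x hmem
          exact ⟨a, by omega, c', d'⟩
        · simp at hmem; subst hmem
          exact ⟨h2, by omega, hcontn, h9 x le_rfl hnltL⟩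
      · intro m hm
        have hb := hbal (m + 1) (hmlen m hm)
        rw [List.take_succ_cons, List.count_cons_self,
            List.count_cons_of_ne (by decide : ('(' : Char) ≠ ')')] at hb
        simp only [List.length_append, List.length_singleton]
        omega
    · by_cases hc2 : c = ')'
      · subst hc2
        have hstne : st ≠ [] := by
          intro hemp
          have hb := hbal 1 (by simp)
          rw [List.take_succ_cons, List.take_zero] at hb
          simp [hemp] at hb
        have hjlast : st.getLast? = some (st.getLast hstne) := List.getLast?_eq_some_getLast hstne
        set j := st.getLast hstne with hjdef
        have hjmem : j ∈ st := List.getLast_mem hstne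
        obtain ⟨hj0, hjn, hjcont, hjpairs⟩ := h5 j hjmem
        have hsA : pvStepA (pairs, st) (n, ')')
            = (PySem.List.pySetD (PySem.List.pySetD pairs n j) j n, st.dropLast) := by
          simp [pvStepA, hjlast]
        have hsB : pvStepD (st, d) (n, ')') = (st.dropLast, d.insert j n) := by
          simp [pvStepD, hjlast]
        rw [hsA, hsB]
        have hlen' : (PySem.List.pySetD (PySem.List.pySetD pairs n j) j n).length = L := by
          simp [PySem.List.length_pySetD, h1]
        have hg : ∀ k : Int, 0 ≤ k → k < (L : Int) →
            PySem.List.pyGetD (PySem.List.pySetD (PySem.List.pySetD pairs n j) j n) k (-1)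
              = if k = j then n else if k = n then j else PySem.List.pyGetD pairs k (-1) := by
          intro k hk0 hkL
          rw [pvGetD_setD _ _ _ _ _ hj0 hk0 (by rw [PySem.List.length_pySetD, h1]; exact hkL)]
          by_cases hkj : k = j
          · simp [hkj]
          · rw [if_neg hkj, if_neg hkj,
                pvGetD_setD _ _ _ _ _ h2 hk0 (by rw [h1]; exact hkL)]
        have hxj : ∀ x ∈ st.dropLast, x ≠ j := by
          have hnd := h4
          conv at hnd => rw [← List.dropLast_append_getLast hstne]
          rw [List.nodup_append] at hnd
          intro x hx heq
          exact hnd.2.2 x hx j (by rw [hjdef]; exact List.mem_singleton_self _) heq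
        refine ih (n + 1) _ st.dropLast (d.insert j n)
          ⟨hlen', by omega, PySem.Dict.nodup_keys_insert _ _ _ h3,
           (List.dropLast_sublist st).nodup h4, ?_, ?_, ?_, ?_, ?_⟩ hL' ?_
        · intro x hx
          have hxs : x ∈ st := List.mem_of_mem_dropLast hx
          obtain ⟨hx0, hxn, hxc, hxp⟩ := h5 x hxs
          refine ⟨hx0, by omega, ?_, ?_⟩
          · rw [PySem.Dict.contains_insert]
            simp [hxc, hxj x hx]
          · rw [hg x hx0 (by omega), if_neg (hxj x hx), if_neg (by omega : ¬ x = n)]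
            exact hxp
        · intro k hk
          rw [PySem.Dict.contains_insert] at hk
          rcases Bool.or_eq_true_iff.mp hk with hk' | hk'
          · have hkj : k = j := by simpa using hk'
            subst hkj; exact ⟨hj0, by omega⟩
          · obtain ⟨a, b⟩ := h6 k hk'; exact ⟨a, by omega⟩
        · intro k v hkv
          rw [PySem.Dict.get?_insert] at hkv
          by_cases hkj : k = j
          · rw [if_pos hkj] at hkv
            have hvn : v = n := by simpa using hkv.symm
            subst hvn
            rw [hkj, hg j hj0 (by omega)]
            exact ⟨hj0, by simp, hjn, by omega⟩
          · rw [if_neg hkj] at hkv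
            obtain ⟨hk0, hp, hkv', hvn⟩ := h7 k v hkv
            rw [hg k hk0 (by omega), if_neg hkj, if_neg (by omega : ¬ k = n)]
            exact ⟨hk0, hp, hkv', by omega⟩
        · intro k hk0 hkL hkc
          rw [PySem.Dict.contains_insert] at hkc
          have hkj : ¬ k = j := by
            intro h; subst h; simp at hkc
          have hkc' : d.contains k = false := by
            rcases Bool.or_eq_false_iff.mp hkc with ⟨_, hb⟩; exact hb
          rw [hg k hk0 hkL, if_neg hkj]
          by_cases hkn : k = n
          · rw [if_pos hkn]; omega
          · rw [if_neg hkn]; exact h8 k hk0 hkL hkc'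
        · intro k hk hkL
          rw [hg k (by omega) hkL, if_neg (by omega : ¬ k = j), if_neg (by omega : ¬ k = n)]
          exact h9 k (by omega) hkL
        · intro m hm
          have hb := hbal (m + 1) (hmlen m hm)
          rw [List.take_succ_cons, List.count_cons_self,
              List.count_cons_of_ne (by decide : (')' : Char) ≠ '(')] at hb
          have hlen2 : st.length = st.dropLast.length + 1 := by
            rw [List.length_dropLast]
            have := List.length_pos_iff.mpr hstne
            omega
          omega
      · have hsA : pvStepA (pairs, st) (n, c) = (pairs, st) := by simp [pvStepA, hc1, hc2]
        have hsB : pvStepD (st, d) (n, c) = (st, d) := by simp [pvStepD, hc1, hc2]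
        rw [hsA, hsB]
        refine ih (n + 1) pairs st d
          ⟨h1, by omega, h3, h4,
           fun x hx => by obtain ⟨a, b, c', d'⟩ := h5 x hx; exact ⟨a, by omega, c', d'⟩,
           fun k hk => ⟨(h6 k hk).1, by have := (h6 k hk).2; omega⟩,
           fun k v hkv => by obtain ⟨a, b, c', d'⟩ := h7 k v hkv; exact ⟨a, b, c', by omega⟩,
           h8, fun k hk hkL => h9 k (by omega) hkL⟩ hL' ?_
        intro m hm
        have hb := hbal (m + 1) (hmlen m hm)
        rw [List.take_succ_cons,
            List.count_cons_of_ne hc2, List.count_cons_of_ne hc1] at hb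
        omega

-- what the scan invariant yields for a whole prefix-balanced string
theorem pvFinal (cs : List Char) (hb : pvPrefixBalanced cs) :
    (get_pairmap cs).length = cs.length ∧
    (∀ k v, (pvRefDict cs).get? k = some v →
      0 ≤ k ∧ PySem.List.pyGetD (get_pairmap cs) k (-1) = v ∧ k < v ∧ v < (cs.length : Int)) ∧
    (∀ k : Int, 0 ≤ k → k < (cs.length : Int) → (pvRefDict cs).get? k = none →
      PySem.List.pyGetD (get_pairmap cs) k (-1) ≤ k) ∧
    (∀ k : Int, k ∈ (pvRefDict cs).keys → 0 ≤ k ∧ k < (cs.length : Int)) := by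
  have hrepl : ∀ (k : Int), 0 ≤ k → k < (cs.length : Int) →
      PySem.List.pyGetD (List.replicate cs.length (-1 : Int)) k (-1) = -1 := by
    intro k h0 hkL
    rw [PySem.List.pyGetD_eq_getElem _ _ h0 (by simpa using hkL)]
    simp
  have hinv0 : pvInv cs.length 0 (List.replicate cs.length (-1)) [] PySem.Dict.empty :=
    ⟨List.length_replicate, le_rfl, PySem.Dict.nodup_keys_empty, List.nodup_nil,
     by simp,
     fun k hk => by simp [PySem.Dict.contains_empty] at hk,
     fun k v hkv => by simp [PySem.Dict.get?_empty] at hkv,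
     fun k h0 hkL _ => by rw [hrepl k h0 hkL]; omega,
     fun k h0 hkL => hrepl k h0 hkL⟩
  obtain ⟨-, hI⟩ := pvScanMain cs cs.length 0 (List.replicate cs.length (-1)) [] PySem.Dict.empty
    hinv0 (by simp) (fun m hm => by simpa using hb m hm)
  obtain ⟨hl, -, -, -, -, hkb, hC1, hC2, -⟩ := hI
  refine ⟨hl, hC1, ?_, ?_⟩
  · intro k h0 hkL hnone
    exact hC2 k h0 hkL ((PySem.Dict.get?_eq_none_iff_contains _ _).mp hnone)
  · intro k hk
    exact hkb k ((PySem.Dict.contains_iff_mem_keys _ _).mpr hk)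

theorem pvZipExt (O C : List Int) (i : Int) (h : C.length ≤ O.length) :
    (O ++ [i]).zip C = O.zip C := by
  induction O generalizing C with
  | nil =>
    have : C = [] := List.eq_nil_of_length_eq_zero (by simpa using h)
    simp [this]
  | cons o O ih =>
    cases C with
    | nil => simp
    | cons c C => simp only [List.cons_append, List.zip_cons_cons, ih C (by simpa using h)]

theorem pvZipSnoc (O C : List Int) (j i : Int) (h : O.length = C.length + 1)
    (hj : O.getLast? = some j) : O.zip (C ++ [i]) = O.zip C ++ [(j, i)] := by
  have hne : O ≠ [] := by intro he; simp [he] at hj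
  have hjl : O.getLast hne = j := by
    rw [List.getLast?_eq_some_getLast hne] at hj; simpa using hj
  have hO : O = O.dropLast ++ [j] := by
    conv_lhs => rw [← List.dropLast_append_getLast hne]
    rw [hjl]
  have hlen : O.dropLast.length = C.length := by
    rw [List.length_dropLast]; omega
  conv_lhs => rw [hO]
  rw [List.zip_append hlen]
  conv_rhs => rw [hO, pvZipExt _ _ _ (by omega)]
  simp

-- dropLast keeps every getElem? strictly before the last position
theorem pvGetElemDropLast (xs : List Int) (n : Nat) (h : n + 1 < xs.length) :
    xs.dropLast[n]? = xs[n]? := by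
  rw [List.getElem?_eq_getElem (by simp; omega), List.getElem?_eq_getElem (by omega)]
  simp [List.getElem_dropLast]

-- B-side: the invariant tying the bucket state (opens, closes, depth) to the
-- reference stack scan (stack, dict); n is the index of the next character
def pvBInv (n : Int) (stack : List Int) (dict : PySem.Dict Int Int)
    (opens closes : PySem.Dict Int (List Int)) (depth : Int) : Prop :=
  depth = (stack.length : Int) ∧ dict.keys.Nodup ∧ closes.keys.Nodup ∧ stack.Nodup ∧
  (∀ x ∈ stack, dict.contains x = false ∧ x < n) ∧
  (∀ k ∈ dict.keys, k < n) ∧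
  (∀ l : Int, 1 ≤ l → l ≤ depth →
     (opens.getD l []).getLast? = stack[(l - 1).toNat]? ∧
     (opens.getD l []).length = (closes.getD l []).length + 1) ∧
  (∀ l : Int, l < 1 ∨ depth < l → (opens.getD l []).length = (closes.getD l []).length) ∧
  (∀ x y : Int, dict.get? x = some y ↔ ∃ l : Int, (x, y) ∈ (opens.getD l []).zip (closes.getD l []))

theorem pvBScan (cs : List Char) (n : Int) (stack : List Int) (dict : PySem.Dict Int Int)
    (opens closes : PySem.Dict Int (List Int)) (depth : Int)
    (hinv : pvBInv n stack dict opens closes depth)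
    (hbal : ∀ m ≤ cs.length, (cs.take m).count ')' ≤ (cs.take m).count '(' + stack.length) :
    pvBInv (n + cs.length) ((PySem.List.enumerate cs n).foldl pvStepD (stack, dict)).1
      ((PySem.List.enumerate cs n).foldl pvStepD (stack, dict)).2
      ((PySem.List.enumerate cs n).foldl pvStepBkt (opens, closes, depth)).1
      ((PySem.List.enumerate cs n).foldl pvStepBkt (opens, closes, depth)).2.1
      ((PySem.List.enumerate cs n).foldl pvStepBkt (opens, closes, depth)).2.2 := by
  induction cs generalizing n stack dict opens closes depth with
  | nil => simpa using hinv
  | cons c cs ih =>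
    obtain ⟨h1, h2, h3, h4, h5, h6, h7, h8, h9⟩ := hinv
    have hmlen : ∀ m : Nat, m ≤ cs.length → m + 1 ≤ (c :: cs).length := by
      intro m hm; simpa using Nat.succ_le_succ hm
    rw [PySem.List.enumerate_cons, List.foldl_cons, List.foldl_cons]
    have hcast : n + ((c :: cs).length : Int) = (n + 1) + (cs.length : Int) := by
      simp only [List.length_cons]; push_cast; ring
    rw [hcast]
    by_cases hc1 : c = '('
    · subst hc1
      have hsD : pvStepD (stack, dict) (n, '(') = (stack ++ [n], dict) := by simp [pvStepD]
      have hsB : pvStepBkt (opens, closes, depth) (n, '(')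
          = (opens.modify (depth + 1) [] (· ++ [n]), closes, depth + 1) := by simp [pvStepBkt]
      rw [hsD, hsB]
      have hgo : ∀ l : Int, (opens.modify (depth + 1) [] (· ++ [n])).getD l []
          = if l = depth + 1 then opens.getD (depth + 1) [] ++ [n] else opens.getD l [] := by
        intro l
        rw [PySem.Dict.getD_modify]
      have hcontn : dict.contains n = false := by
        cases hcc : dict.contains n with
        | false => rfl
        | true =>
          have := h6 n ((PySem.Dict.contains_iff_mem_keys _ _).mp hcc)
          omega
      have hnotmem : n ∉ stack := fun hmem => absurd (h5 n hmem).2 (by omega)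
      refine ih (n + 1) (stack ++ [n]) dict _ closes (depth + 1)
        ⟨by simp only [List.length_append, List.length_singleton]; push_cast; omega, h2, h3, ?_, ?_, fun k hk => by have := h6 k hk; omega,
         ?_, ?_, ?_⟩ ?_
      · rw [List.nodup_append]
        exact ⟨h4, List.nodup_singleton _, fun x hx y hy hxy => by
          simp at hy; subst hy; exact hnotmem (hxy ▸ hx)⟩
      · intro x hx
        rcases List.mem_append.mp hx with hmem | hmem
        · have := h5 x hmem; exact ⟨this.1, by omega⟩
        · simp at hmem; subst hmem; exact ⟨hcontn, by omega⟩
      · intro l hl1 hl2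
        rw [hgo]
        by_cases hld : l = depth + 1
        · subst hld
          have hlen0 : (opens.getD (depth + 1) []).length = (closes.getD (depth + 1) []).length :=
            h8 _ (Or.inr (by omega))
          rw [if_pos rfl]
          constructor
          · have hidx : (depth + 1 - 1).toNat = stack.length := by omega
            rw [hidx, List.getElem?_concat_length]
            simp
          · simp [hlen0]
        · rw [if_neg hld]
          have hl2' : l ≤ depth := by omega
          obtain ⟨ha, hb⟩ := h7 l hl1 hl2'
          refine ⟨?_, hb⟩
          rw [ha, List.getElem?_append_left]
          have : l - 1 < (stack.length : Int) := by omega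
          omega
      · intro l hl
        rw [hgo, if_neg (by omega : ¬ l = depth + 1)]
        exact h8 l (by omega)
      · intro x y
        rw [h9 x y]
        apply exists_congr
        intro l
        rw [hgo]
        by_cases hld : l = depth + 1
        · subst hld
          rw [if_pos rfl, pvZipExt _ _ _ (le_of_eq (h8 _ (Or.inr (by omega))).symm)]
        · rw [if_neg hld]
      · intro m hm
        have hb := hbal (m + 1) (hmlen m hm)
        rw [List.take_succ_cons, List.count_cons_self,
            List.count_cons_of_ne (by decide : ('(' : Char) ≠ ')')] at hb
        simp only [List.length_append, List.length_singleton]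
        omega
    · by_cases hc2 : c = ')'
      · subst hc2
        have hstne : stack ≠ [] := by
          intro hemp
          have hb := hbal 1 (by simp)
          rw [List.take_succ_cons, List.take_zero] at hb
          simp [hemp] at hb
        have hjlast : stack.getLast? = some (stack.getLast hstne) := List.getLast?_eq_some_getLast hstne
        set j := stack.getLast hstne with hjdef
        have hjmem : j ∈ stack := List.getLast_mem hstne
        obtain ⟨hjcont, hjn⟩ := h5 j hjmem
        have hslen : 1 ≤ stack.length := List.length_pos_iff.mpr hstne
        have hsD : pvStepD (stack, dict) (n, ')') = (stack.dropLast, dict.insert j n) := by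
          simp [pvStepD, hjlast]
        have hsB : pvStepBkt (opens, closes, depth) (n, ')')
            = (opens, closes.modify depth [] (· ++ [n]), depth - 1) := by simp [pvStepBkt]
        rw [hsD, hsB]
        have hgc : ∀ l : Int, (closes.modify depth [] (· ++ [n])).getD l []
            = if l = depth then closes.getD depth [] ++ [n] else closes.getD l [] := by
          intro l; rw [PySem.Dict.getD_modify]
        obtain ⟨hOlast, hOlen⟩ := h7 depth (by omega) le_rfl
        have hOj : (opens.getD depth []).getLast? = some j := by
          rw [hOlast]
          have hidx : (depth - 1).toNat = stack.length - 1 := by omega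
          rw [hidx, ← List.getLast?_eq_getElem?, hjlast]
        have hzipd : (opens.getD depth []).zip (closes.getD depth [] ++ [n])
            = (opens.getD depth []).zip (closes.getD depth []) ++ [(j, n)] :=
          pvZipSnoc _ _ _ _ hOlen hOj
        have hjnone : dict.get? j = none := (PySem.Dict.get?_eq_none_iff_contains _ _).mpr hjcont
        have hxj : ∀ x ∈ stack.dropLast, x ≠ j := by
          have hnd := h4
          conv at hnd => rw [← List.dropLast_append_getLast hstne]
          rw [List.nodup_append] at hnd
          intro x hx heq
          exact hnd.2.2 x hx j (by rw [hjdef]; exact List.mem_singleton_self _) heq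
        refine ih (n + 1) stack.dropLast (dict.insert j n) opens _ (depth - 1)
          ⟨by rw [List.length_dropLast]; omega,
           PySem.Dict.nodup_keys_insert _ _ _ h2, ?_,
           (List.dropLast_sublist stack).nodup h4, ?_, ?_, ?_, ?_, ?_⟩ ?_
        · rw [PySem.Dict.keys_modify]
          exact PySem.Dict.nodup_keys_insert _ _ _ h3
        · intro x hx
          obtain ⟨hxc, hxn⟩ := h5 x (List.mem_of_mem_dropLast hx)
          refine ⟨?_, by omega⟩
          rw [PySem.Dict.contains_insert]
          simp [hxc, hxj x hx]
        · intro k hk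
          rw [PySem.Dict.mem_keys_insert] at hk
          rcases hk with rfl | hk
          · omega
          · have := h6 k hk; omega
        · intro l hl1 hl2
          obtain ⟨ha, hb⟩ := h7 l hl1 (by omega)
          rw [hgc, if_neg (by omega : ¬ l = depth)]
          refine ⟨?_, hb⟩
          rw [ha, pvGetElemDropLast]
          omega
        · intro l hl
          rw [hgc]
          by_cases hld : l = depth
          · subst hld
            rw [if_pos rfl]
            simp [hOlen]
          · rw [if_neg hld]
            exact h8 l (by omega)
        · intro x y
          rw [PySem.Dict.get?_insert]
          constructor
          · intro hxy
            by_cases hxeq : x = j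
            · rw [if_pos hxeq] at hxy
              have hy : y = n := by simpa using hxy.symm
              subst hy
              refine ⟨depth, ?_⟩
              rw [hgc, if_pos rfl, hzipd, hxeq]
              simp
            · rw [if_neg hxeq] at hxy
              obtain ⟨l, hl⟩ := (h9 x y).mp hxy
              refine ⟨l, ?_⟩
              rw [hgc]
              by_cases hld : l = depth
              · subst hld
                rw [if_pos rfl, hzipd]
                exact List.mem_append_left _ hl
              · rw [if_neg hld]; exact hl
          · rintro ⟨l, hl⟩
            rw [hgc] at hl
            by_cases hld : l = depth
            · subst hld
              rw [if_pos rfl, hzipd, List.mem_append] at hl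
              rcases hl with hl | hl
              · have hxy := (h9 x y).mpr ⟨l, hl⟩
                have hxne : x ≠ j := by
                  intro h; subst h; rw [hjnone] at hxy; simp at hxy
                rw [if_neg hxne]; exact hxy
              · simp at hl
                rw [if_pos hl.1, hl.2]
            · rw [if_neg hld] at hl
              have hxy := (h9 x y).mpr ⟨l, hl⟩
              have hxne : x ≠ j := by
                intro h; subst h; rw [hjnone] at hxy; simp at hxy
              rw [if_neg hxne]; exact hxy
        · intro m hm
          have hb := hbal (m + 1) (hmlen m hm)
          rw [List.take_succ_cons, List.count_cons_self,
              List.count_cons_of_ne (by decide : (')' : Char) ≠ '(')] at hb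
          have hlen2 : stack.length = stack.dropLast.length + 1 := by
            rw [List.length_dropLast]; omega
          omega
      · have hsD : pvStepD (stack, dict) (n, c) = (stack, dict) := by simp [pvStepD, hc1, hc2]
        have hsB : pvStepBkt (opens, closes, depth) (n, c) = (opens, closes, depth) := by
          simp [pvStepBkt, hc1, hc2]
        rw [hsD, hsB]
        refine ih (n + 1) stack dict opens closes depth
          ⟨h1, h2, h3, h4, fun x hx => ⟨(h5 x hx).1, by have := (h5 x hx).2; omega⟩,
           fun k hk => by have := h6 k hk; omega, h7, h8, h9⟩ ?_
        intro m hm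
        have hb := hbal (m + 1) (hmlen m hm)
        rw [List.take_succ_cons, List.count_cons_of_ne hc2, List.count_cons_of_ne hc1] at hb
        omega

theorem pvMemFoldUpdate (its : List (Int × List Int)) (f : Int → List Int)
    (s0 : PySem.Set (Int × Int)) (x : Int × Int) :
    x ∈ its.foldl (fun s q => PySem.Set.update s ((f q.1).zip q.2)) s0 ↔
      x ∈ s0 ∨ ∃ q ∈ its, x ∈ (f q.1).zip q.2 := by
  induction its generalizing s0 with
  | nil => simp
  | cons q its ih =>
    rw [List.foldl_cons, ih, PySem.Set.mem_update]
    simp only [List.mem_cons]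
    constructor
    · rintro ((h | h) | ⟨r, hr, hx⟩)
      · exact Or.inl h
      · exact Or.inr ⟨q, Or.inl rfl, h⟩
      · exact Or.inr ⟨r, Or.inr hr, hx⟩
    · rintro (h | ⟨r, (rfl | hr), hx⟩)
      · exact Or.inl (Or.inl h)
      · exact Or.inl (Or.inr hx)
      · exact Or.inr ⟨r, hr, hx⟩

theorem pvNodupFoldUpdate (its : List (Int × List Int)) (f : Int → List Int)
    (s0 : PySem.Set (Int × Int)) (h : s0.Nodup) :
    (its.foldl (fun s q => PySem.Set.update s ((f q.1).zip q.2)) s0).Nodup := by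
  induction its generalizing s0 with
  | nil => exact h
  | cons q its ih => exact ih _ (PySem.Set.nodup_update _ _ h)

-- B's pair set is exactly the graph of the reference dict
theorem pvPairsChar (cs : List Char) (hb : pvPrefixBalanced cs) :
    (pvPairs cs).Nodup ∧
    (∀ x : Int × Int, x ∈ pvPairs cs ↔ (pvRefDict cs).get? x.1 = some x.2) := by
  have hinv0 : pvBInv 0 [] PySem.Dict.empty PySem.Dict.empty PySem.Dict.empty 0 := by
    refine ⟨by simp, PySem.Dict.nodup_keys_empty, PySem.Dict.nodup_keys_empty, List.nodup_nil,
      by simp, by simp [PySem.Dict.keys_empty], fun l hl1 hl2 => by omega,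
      fun l _ => by simp [PySem.Dict.getD_empty], fun x y => ?_⟩
    simp [PySem.Dict.get?_empty, PySem.Dict.getD_empty]
  have hI := pvBScan cs 0 [] PySem.Dict.empty PySem.Dict.empty PySem.Dict.empty 0 hinv0
    (fun m hm => by simpa using hb m hm)
  obtain ⟨-, -, hclN, -, -, -, -, -, hiff⟩ := hI
  simp only [pvPairs, pvRefDict]
  set st := (PySem.List.enumerate cs 0).foldl pvStepBkt
    (PySem.Dict.empty, PySem.Dict.empty, 0) with hst
  constructor
  · exact pvNodupFoldUpdate st.2.1.items (fun l => st.1.getD l []) PySem.Set.empty List.nodup_nil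
  · intro x
    rw [pvMemFoldUpdate st.2.1.items (fun l => st.1.getD l []) PySem.Set.empty x]
    have hmem : (∃ q ∈ st.2.1.items, x ∈ (st.1.getD q.1 []).zip q.2) ↔
        ∃ l : Int, x ∈ (st.1.getD l []).zip (st.2.1.getD l []) := by
      constructor
      · rintro ⟨⟨l, C⟩, hq, hx⟩
        refine ⟨l, ?_⟩
        have hC : st.2.1.getD l [] = C := by
          rw [PySem.Dict.getD_eq_get?_getD, PySem.Dict.get?_of_mem_items _ hq hclN]; rfl
        rw [hC]
        exact hx
      · rintro ⟨l, hx⟩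
        cases hg : st.2.1.get? l with
        | none =>
          have hC : st.2.1.getD l [] = [] := by rw [PySem.Dict.getD_eq_get?_getD, hg]; rfl
          rw [hC] at hx
          simp at hx
        | some C =>
          refine ⟨(l, C), ((PySem.Dict.get?_eq_some_iff_mem_items _ _ _ hclN).mp hg), ?_⟩
          have hC : st.2.1.getD l [] = C := by rw [PySem.Dict.getD_eq_get?_getD, hg]; rfl
          rw [hC] at hx
          exact hx
    rw [hmem]
    simp only [PySem.Set.empty]
    rw [← hiff x.1 x.2]
    simp

-- a key is present iff some value is stored at it
theorem pvMemKeysIff (d : PySem.Dict Int Int) (i : Int) :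
    i ∈ d.keys ↔ ∃ v, d.get? i = some v := by
  constructor
  · intro h
    cases hg : d.get? i with
    | none => exact absurd h ((PySem.Dict.get?_eq_none_iff_not_mem_keys d i).mp hg)
    | some v => exact ⟨v, rfl⟩
  · rintro ⟨v, hv⟩
    by_contra hmem
    rw [(PySem.Dict.get?_eq_none_iff_not_mem_keys d i).mpr hmem] at hv
    simp at hv

-- ===== VERDICT (by name: the statement is the Claim_ definition above) =====
theorem bp_distance_spec : Claim_equal_bp_distance := by
  intro s1 s2 _hdom hpre
  obtain ⟨hlen, hb1, hb2⟩ := hpre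
  unfold Spec_bp_distance bp_distance bp_distance_alt
  obtain ⟨l1, C1a, C2a, kba⟩ := pvFinal s1.toList hb1
  obtain ⟨l2, C1b, C2b, kbb⟩ := pvFinal s2.toList hb2
  rw [← hlen] at l2 C1b C2b kbb
  obtain ⟨hnd1, hmem1⟩ := pvPairsChar s1.toList hb1
  obtain ⟨hnd2, hmem2⟩ := pvPairsChar s2.toList hb2
  set pm1 := get_pairmap s1.toList with hpm1
  set pm2 := get_pairmap s2.toList with hpm2
  set d1 := pvRefDict s1.toList with hd1
  set d2 := pvRefDict s2.toList with hd2
  set p1 := pvPairs s1.toList with hp1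
  set p2 := pvPairs s2.toList with hp2
  set L := s1.toList.length with hLdef
  simp only [PySem.List.len_eq, l1]
  rw [PySem.List.foldl_ite_add_one]
  set U := PySem.Set.union (PySem.Set.ofList (p1.map Prod.fst)) (p2.map Prod.fst) with hUdef
  set I := PySem.Set.inter p1 p2 with hIdef
  have hUnd : U.Nodup := PySem.Set.nodup_union _ _ (PySem.Set.nodup_ofList _)
  have hmemU : ∀ i : Int, i ∈ U ↔ i ∈ d1.keys ∨ i ∈ d2.keys := by
    intro i
    rw [hUdef, PySem.Set.mem_union, PySem.Set.mem_ofList, pvMemKeysIff, pvMemKeysIff]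
    constructor
    · rintro (h | h)
      · obtain ⟨x, hx, rfl⟩ := List.mem_map.mp h
        exact Or.inl ⟨x.2, (hmem1 x).mp hx⟩
      · obtain ⟨x, hx, rfl⟩ := List.mem_map.mp h
        exact Or.inr ⟨x.2, (hmem2 x).mp hx⟩
    · rintro (⟨v, hv⟩ | ⟨v, hv⟩)
      · exact Or.inl (List.mem_map.mpr ⟨(i, v), (hmem1 (i, v)).mpr hv, rfl⟩)
      · exact Or.inr (List.mem_map.mpr ⟨(i, v), (hmem2 (i, v)).mpr hv, rfl⟩)
  have hiff : ∀ i : Int,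
      ((0 ≤ i ∧ i < (L : Int)) ∧
        (PySem.List.pyGetD pm1 i (-1) ≠ PySem.List.pyGetD pm2 i (-1) ∧
          (PySem.List.pyGetD pm1 i (-1) > i ∨ PySem.List.pyGetD pm2 i (-1) > i)))
      ↔ ((i ∈ d1.keys ∨ i ∈ d2.keys) ∧ d1.get? i ≠ d2.get? i) := by
    intro i
    constructor
    · rintro ⟨⟨h0, hL⟩, hne, hgt⟩
      cases hg1 : d1.get? i with
      | none =>
        cases hg2 : d2.get? i with
        | none =>
          have := C2a i h0 hL hg1
          have := C2b i h0 hL hg2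
          rcases hgt with h | h <;> omega
        | some v2 =>
          refine ⟨Or.inr ?_, by simp⟩
          by_contra hmem
          rw [(PySem.Dict.get?_eq_none_iff_not_mem_keys d2 i).mpr hmem] at hg2
          simp at hg2
      | some v1 =>
        refine ⟨Or.inl ?_, ?_⟩
        · by_contra hmem
          rw [(PySem.Dict.get?_eq_none_iff_not_mem_keys d1 i).mpr hmem] at hg1
          simp at hg1
        · cases hg2 : d2.get? i with
          | none => simp
          | some v2 =>
            obtain ⟨-, hp1, -, -⟩ := C1a i v1 hg1
            obtain ⟨-, hp2, -, -⟩ := C1b i v2 hg2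
            rw [hp1, hp2] at hne
            simp [hne]
    · rintro ⟨hu, hne⟩
      cases hg1 : d1.get? i with
      | none =>
        cases hg2 : d2.get? i with
        | none =>
          rcases hu with hu | hu
          · exact absurd hu ((PySem.Dict.get?_eq_none_iff_not_mem_keys d1 i).mp hg1)
          · exact absurd hu ((PySem.Dict.get?_eq_none_iff_not_mem_keys d2 i).mp hg2)
        | some v2 =>
          obtain ⟨h0, hp2, hiv, hvL⟩ := C1b i v2 hg2
          have hle : PySem.List.pyGetD pm1 i (-1) ≤ i := C2a i h0 (by omega) hg1
          exact ⟨⟨h0, by omega⟩, by omega, Or.inr (by omega)⟩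
      | some v1 =>
        obtain ⟨h0, hp1, hiv, hvL⟩ := C1a i v1 hg1
        cases hg2 : d2.get? i with
        | none =>
          have hle : PySem.List.pyGetD pm2 i (-1) ≤ i := C2b i h0 (by omega) hg2
          exact ⟨⟨h0, by omega⟩, by omega, Or.inl (by omega)⟩
        | some v2 =>
          have hvne : v1 ≠ v2 := by
            intro h; subst h; rw [hg1, hg2] at hne; exact hne rfl
          obtain ⟨-, hp2, -, -⟩ := C1b i v2 hg2
          exact ⟨⟨h0, by omega⟩, by omega, Or.inl (by omega)⟩
  have hperm1 : (PySem.List.pyRange 0 (L : Int) 1).filter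
        (fun i => decide (PySem.List.pyGetD pm1 i (-1) ≠ PySem.List.pyGetD pm2 i (-1) ∧
          (PySem.List.pyGetD pm1 i (-1) > i ∨ PySem.List.pyGetD pm2 i (-1) > i))) |>.Perm
      (U.filter (fun i => decide (d1.get? i ≠ d2.get? i))) := by
    rw [List.perm_ext_iff_of_nodup
      (List.Nodup.filter _ (PySem.List.nodup_pyRange_one 0 (L : Int))) (List.Nodup.filter _ hUnd)]
    intro a
    simp only [List.mem_filter, decide_eq_true_eq, PySem.List.mem_pyRange_one]
    constructor
    · rintro ⟨hr, hp⟩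
      obtain ⟨hk, hne⟩ := (hiff a).mp ⟨hr, hp⟩
      exact ⟨(hmemU a).mpr hk, hne⟩
    · rintro ⟨hu, hne⟩
      exact (hiff a).mpr ⟨(hmemU a).mp hu, hne⟩
  have hfstI : ∀ i : Int, i ∈ I.map Prod.fst ↔ i ∈ U ∧ d1.get? i = d2.get? i := by
    intro i
    rw [List.mem_map]
    constructor
    · rintro ⟨x, hx, rfl⟩
      rw [hIdef, PySem.Set.mem_inter] at hx
      have h1 := (hmem1 x).mp hx.1
      have h2 := (hmem2 x).mp hx.2
      exact ⟨(hmemU x.1).mpr (Or.inl ((pvMemKeysIff d1 x.1).mpr ⟨x.2, h1⟩)), by rw [h1, h2]⟩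
    · rintro ⟨hu, heq⟩
      rcases (hmemU i).mp hu with hk | hk
      · obtain ⟨v, hv⟩ := (pvMemKeysIff d1 i).mp hk
        refine ⟨(i, v), ?_, rfl⟩
        rw [hIdef, PySem.Set.mem_inter]
        exact ⟨(hmem1 _).mpr hv, (hmem2 _).mpr (by rw [← heq]; exact hv)⟩
      · obtain ⟨v, hv⟩ := (pvMemKeysIff d2 i).mp hk
        refine ⟨(i, v), ?_, rfl⟩
        rw [hIdef, PySem.Set.mem_inter]
        exact ⟨(hmem1 _).mpr (by rw [heq]; exact hv), (hmem2 _).mpr hv⟩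
  have hI_nd : I.Nodup := PySem.Set.nodup_inter _ _ hnd1
  have hInj : (I.map Prod.fst).Nodup := by
    refine (List.nodup_map_iff_inj_on hI_nd).mpr ?_
    intro x hx y hy hxy
    rw [hIdef, PySem.Set.mem_inter] at hx hy
    have h1 := (hmem1 x).mp hx.1
    have h2 := (hmem1 y).mp hy.1
    rw [hxy, h2] at h1
    have : x.2 = y.2 := by simpa using h1.symm
    exact Prod.ext hxy this
  have hperm2 : (I.map Prod.fst).Perm (U.filter (fun i => decide (d1.get? i = d2.get? i))) := by
    rw [List.perm_ext_iff_of_nodup hInj (List.Nodup.filter _ hUnd)]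
    intro a
    rw [hfstI a, List.mem_filter]
    simp
  have hsplit : U.length = (U.filter (fun i => decide (d1.get? i ≠ d2.get? i))).length
      + (U.filter (fun i => decide (d1.get? i = d2.get? i))).length := by
    have h := List.length_eq_length_filter_add (l := U) (fun i => decide (d1.get? i ≠ d2.get? i))
    have hcongr : U.filter (fun i => !decide (d1.get? i ≠ d2.get? i))
        = U.filter (fun i => decide (d1.get? i = d2.get? i)) := by
      apply List.filter_congr
      intro i _
      simp
    rw [hcongr] at h
    exact h
  have hcnt : List.countP
        (fun i => decide (PySem.List.pyGetD pm1 i (-1) ≠ PySem.List.pyGetD pm2 i (-1) ∧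
          (PySem.List.pyGetD pm1 i (-1) > i ∨ PySem.List.pyGetD pm2 i (-1) > i)))
        (PySem.List.pyRange 0 (L : Int) 1)
      = (U.filter (fun i => decide (d1.get? i ≠ d2.get? i))).length := by
    rw [List.countP_eq_length_filter]
    exact hperm1.length_eq
  have hIlen : I.length = (U.filter (fun i => decide (d1.get? i = d2.get? i))).length := by
    rw [← hperm2.length_eq, List.length_map]
  simp only [PySem.Set.len]
  rw [hcnt]
  omega
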